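-- pv_equiv track=rewrite | github.com/wysockipiotr/aoc | src/aoc/day_14_docking_data/docking_data.py | address_masking
-- ===== SOURCE A (Python) =====
-- from itertools import product
-- from typing import Callable, DefaultDict, List, Optional
--
-- Memory = DefaultDict[int, int]
--
-- def address_masking(memory: Memory, mask: str, address: int, value: int) -> Memory:
--     address_bits = "".join(
--         "X" if mask_bit == "X" else ("1" if mask_bit == "1" else address_bit)
--         for mask_bit, address_bit in zip(mask, bin(address)[2:].zfill(36))
--     )
--     n_floating = sum(bit == "X" for bit in address_bits)
--     for bits in product({"0", "1"}, repeat=n_floating):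
--         effective_address = address_bits
--         floating_indices = [
--             index for index, bit in enumerate(address_bits) if bit == "X"
--         ]
--         for floating_index, bit in zip(floating_indices, bits):
--             effective_address = (
--                 effective_address[:floating_index]
--                 + bit
--                 + effective_address[floating_index + 1 :]
--             )
--         memory[int(effective_address)] = int(value)
--     return memory
-- ===== SOURCE B (Python) =====
-- def address_masking(memory, mask, address, value):
--     template = [m if m in "1X" else b for m, b in zip(mask, format(address, "036b"))]
--     addrs = [""]
--     for ch in template:
--         if ch == "X":
--             addrs = [s + b for s in addrs for b in "01"]
--         else:
--             addrs = [s + ch for s in addrs]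
--     for s in addrs:
--         memory[int(s)] = int(value)
--     return memory
-- ===== Notes on version B (the rewrite author's own statement) =====
-- stated objective: idiomatic
-- what changed: Replaces itertools.product over the floating positions plus repeated string slicing (recomputing the floating-index list in every iteration) with a single left fold over the masked template that extends a list of partial address strings, doubling it at each X.
-- outside the precondition, e.g. on address_masking({}, '0', -5, 7): A returns {0: 7}, B raises ValueError; on address_masking({}, '', 0, 0): A raises ValueError, B raises ValueError
import Mathlib
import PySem

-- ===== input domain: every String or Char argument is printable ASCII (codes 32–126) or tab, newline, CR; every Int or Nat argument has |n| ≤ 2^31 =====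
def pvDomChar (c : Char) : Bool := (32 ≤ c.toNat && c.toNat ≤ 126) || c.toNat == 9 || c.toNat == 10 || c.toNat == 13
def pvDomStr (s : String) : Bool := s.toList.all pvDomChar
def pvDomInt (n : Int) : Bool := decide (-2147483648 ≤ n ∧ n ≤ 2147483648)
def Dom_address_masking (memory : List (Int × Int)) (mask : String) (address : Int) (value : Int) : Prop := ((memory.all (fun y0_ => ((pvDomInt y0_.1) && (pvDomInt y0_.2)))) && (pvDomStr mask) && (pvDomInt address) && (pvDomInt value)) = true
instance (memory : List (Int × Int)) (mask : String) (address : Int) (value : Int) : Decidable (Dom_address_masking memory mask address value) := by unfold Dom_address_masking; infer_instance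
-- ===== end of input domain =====

-- B replaces itertools.product + per-combination string slicing with one left fold over the
-- masked template that extends a list of partial address strings (objective: idiomatic).
-- Both versions mutate `memory` in place in Python; the equivalence proved is about the returned dict.


-- ===== PORT A =====
-- bin(n)[2:] for n ≥ 0 (Pre_ restricts address to 0 ≤ address, where this is exact)
def pvBinDigits : Nat → List Char
  | 0 => []
  | n + 1 => pvBinDigits ((n + 1) / 2) ++ [if (n + 1) % 2 = 1 then '1' else '0']
def pvBin (n : Int) : List Char := if n = 0 then ['0'] else pvBinDigits n.toNat
-- s.zfill(36)
def pvZfill36 (l : List Char) : List Char := List.replicate (36 - l.length) '0' ++ l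
-- int(s) on an all-digit string (exact there; Pre_ guarantees every char is a digit)
def pvParse10 (l : List Char) : Int := l.foldl (fun a c => a * 10 + ((c.toNat : Int) - 48)) 0
-- itertools.product(('0','1'), repeat=n), lexicographic.  Python A iterates product({"0","1"}, …):
-- the iteration order of the set literal is hash-dependent; it is ported in the fixed ('0','1')
-- order (the resulting dict is the same up to the insertion position of the fresh keys).
def pvProdRep : Nat → List (List Char)
  | 0 => [[]]
  | n + 1 => (pvProdRep n).map (fun t => '0' :: t) ++ (pvProdRep n).map (fun t => '1' :: t)

def address_masking (memory : List (Int × Int)) (mask : String) (address : Int) (value : Int) : List (Int × Int) :=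
  let address_bits : List Char :=
    (mask.toList.zip (pvZfill36 (pvBin address))).map
      (fun p => if p.1 = 'X' then 'X' else if p.1 = '1' then '1' else p.2)
  -- sum(bit == "X" for bit in address_bits)  (a sum of 0/1, hence kept as a Nat accumulator)
  let n_floating : Nat := address_bits.foldl (fun acc c => if c = 'X' then acc + 1 else acc) 0
  let d := (pvProdRep n_floating).foldl
    (fun d bits =>
      -- floating_indices is recomputed inside the loop, as in A; its entries are ≥ 0, so the
      -- slices s[:i] / s[i+1:] are take/drop at i.toNat
      let floating_indices : List Int :=
        ((PySem.List.enumerate address_bits).filter (fun p => p.2 = 'X')).map (fun p => p.1)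
      let effective_address : List Char :=
        (floating_indices.zip bits).foldl
          (fun e p => e.take p.1.toNat ++ [p.2] ++ e.drop (p.1.toNat + 1)) address_bits
      d.insert (pvParse10 effective_address) value)
    (PySem.Dict.ofList memory)
  d.items

-- ===== PORT B =====
def address_masking_alt (memory : List (Int × Int)) (mask : String) (address : Int) (value : Int) : List (Int × Int) :=
  -- format(address, "036b") for address ≥ 0 is the zero-padded binary rendering, shared helper
  let template : List Char :=
    (mask.toList.zip (pvZfill36 (pvBin address))).map
      (fun p => if p.1 = '1' ∨ p.1 = 'X' then p.1 else p.2)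
  let addrs : List (List Char) :=
    template.foldl
      (fun acc c =>
        if c = 'X' then acc.flatMap (fun s => [s ++ ['0'], s ++ ['1']])
        else acc.map (fun s => s ++ [c]))
      [([] : List Char)]
  (addrs.foldl (fun d s => d.insert (pvParse10 s) value) (PySem.Dict.ofList memory)).items

-- ===== PRECONDITION & SPEC =====
-- Pre_ restricts to the natural domain of the puzzle: a nonempty mask and a nonnegative 36-bit
-- style address.  For the empty mask int('') raises ValueError in both programs; for negative
-- addresses bin() yields '-0b…' and int() on the masked string generally raises (where A happens
-- to return because the mask hides the sign characters, the value is a formatting artefact).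
def Pre_address_masking (memory : List (Int × Int)) (mask : String) (address : Int) (value : Int) : Prop :=
  mask ≠ "" ∧ 0 ≤ address
instance (memory : List (Int × Int)) (mask : String) (address : Int) (value : Int) : Decidable (Pre_address_masking memory mask address value) := by unfold Pre_address_masking; infer_instance
def pvWitness_address_masking : (List (Int × Int)) × String × Int × Int := ([(0, 1)], "X01", 5, 7)

def Spec_address_masking (memory : List (Int × Int)) (mask : String) (address : Int) (value : Int) (out : List (Int × Int)) : Prop := out = address_masking_alt memory mask address value
instance (memory : List (Int × Int)) (mask : String) (address : Int) (value : Int) (out : List (Int × Int)) : Decidable (Spec_address_masking memory mask address value out) := by unfold Spec_address_masking; infer_instance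

-- ===== CLAIM (what is proved, stated in full; the proofs are below) =====
def Claim_equal_address_masking : Prop := ∀ (memory : List (Int × Int)) (mask : String) (address : Int) (value : Int), Dom_address_masking memory mask address value → Pre_address_masking memory mask address value → Spec_address_masking memory mask address value (address_masking memory mask address value)

-- ===== LEMMAS AND PROOFS =====

-- canonical substitution: replace the 'X's of t, left to right, by the bits
def pvSubst : List Char → List Char → List Char
  | [], _ => []
  | c :: rest, bits =>
    if c = 'X' then
      match bits with
      | b :: bs => b :: pvSubst rest bs
      | [] => 'X' :: pvSubst rest []
    else c :: pvSubst rest bits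

theorem pvSubst_nil (t : List Char) : pvSubst t [] = t := by
  induction t with
  | nil => rfl
  | cons c rest ih => by_cases h : c = 'X' <;> simp [pvSubst, h, ih]

theorem enumerate_shift {α : Type} (xs : List α) (s : Int) :
    PySem.List.enumerate xs (s + 1) = (PySem.List.enumerate xs s).map (fun p => (p.1 + 1, p.2)) := by
  induction xs generalizing s with
  | nil => simp [PySem.List.enumerate_nil]
  | cons x xs ih =>
    simp [PySem.List.enumerate_cons, ih (s + 1)]

theorem foldl_setAt_shift (idxs : List Int) (bs : List Char) (x : Char) (e : List Char)
    (h : ∀ i ∈ idxs, 0 ≤ i) :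
    ((idxs.map (fun i => i + 1)).zip bs).foldl
      (fun e p => e.take p.1.toNat ++ [p.2] ++ e.drop (p.1.toNat + 1)) (x :: e)
      = x :: (idxs.zip bs).foldl
      (fun e p => e.take p.1.toNat ++ [p.2] ++ e.drop (p.1.toNat + 1)) e := by
  induction idxs generalizing bs x e with
  | nil => simp
  | cons q qs ih =>
    cases bs with
    | nil => simp
    | cons b bsr =>
      have hq : 0 ≤ q := h q (by simp)
      have htn : (q + 1).toNat = q.toNat + 1 := by omega
      simp only [List.map_cons, List.zip_cons_cons, List.foldl_cons, htn]
      rw [List.take_succ_cons, List.drop_succ_cons]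
      simpa using ih bsr x (e.take q.toNat ++ [b] ++ e.drop (q.toNat + 1))
        (fun i hi => h i (by simp [hi]))

theorem floatIdx_cons (c : Char) (rest : List Char) :
    ((PySem.List.enumerate (c :: rest) 0).filter (fun p => p.2 = 'X')).map (fun p => p.1)
    = (if c = 'X' then [(0 : Int)] else [])
      ++ (((PySem.List.enumerate rest 0).filter (fun p => p.2 = 'X')).map (fun p => p.1)).map
          (fun i => i + 1) := by
  rw [PySem.List.enumerate_cons, enumerate_shift rest 0]
  by_cases hc : c = 'X' <;>
      simp [hc, List.filter_map, List.map_map] <;>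
    · rw [show ((fun p : Int × Char => decide (p.2 = 'X')) ∘ fun p : Int × Char => (p.1 + 1, p.2))
          = (fun p : Int × Char => decide (p.2 = 'X')) from by funext p; rfl]
      exact List.map_congr_left (fun p _ => rfl)

theorem floatIdx_nonneg (t : List Char) :
    ∀ i ∈ ((PySem.List.enumerate t).filter (fun p => p.2 = 'X')).map (fun p => p.1), 0 ≤ i := by
  intro i hi
  rcases List.mem_map.mp hi with ⟨p, hp, rfl⟩
  rcases (PySem.List.mem_enumerate_iff _ _ _).mp (List.mem_filter.mp hp).1 with ⟨k, hk, rfl⟩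
  simp

theorem subst_eq (t bits : List Char) :
    (((((PySem.List.enumerate t).filter (fun p => p.2 = 'X')).map (fun p => p.1)).zip bits).foldl
      (fun e p => e.take p.1.toNat ++ [p.2] ++ e.drop (p.1.toNat + 1)) t) = pvSubst t bits := by
  induction t generalizing bits with
  | nil => simp [PySem.List.enumerate_nil, pvSubst]
  | cons c rest ih =>
    rw [floatIdx_cons]
    by_cases hc : c = 'X'
    · cases bits with
      | nil => simp [pvSubst_nil]
      | cons b bs =>
        rw [if_pos hc]
        simp only [List.singleton_append, List.zip_cons_cons, List.foldl_cons]
        have hstep : (c :: rest).take (0 : Int).toNat ++ [b]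
            ++ (c :: rest).drop ((0 : Int).toNat + 1) = b :: rest := by simp
        rw [hstep, foldl_setAt_shift _ _ _ _ (floatIdx_nonneg rest), ih bs]
        simp [pvSubst, hc]
    · simp only [if_neg hc, List.nil_append]
      rw [foldl_setAt_shift _ _ _ _ (floatIdx_nonneg rest), ih bits]
      simp [pvSubst, hc]

theorem countX_eq (t : List Char) (a : Nat) :
    t.foldl (fun acc c => if c = 'X' then acc + 1 else acc) a = a + t.countP (fun c => c = 'X') := by
  induction t generalizing a with
  | nil => simp
  | cons c rest ih => by_cases h : c = 'X' <;> simp [h, ih] <;> omega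

theorem expand_eq (t : List Char) (acc : List (List Char)) :
    t.foldl
      (fun acc c =>
        if c = 'X' then acc.flatMap (fun s => [s ++ ['0'], s ++ ['1']])
        else acc.map (fun s => s ++ [c])) acc
    = acc.flatMap (fun s => (pvProdRep (t.countP (fun c => c = 'X'))).map (fun bits => s ++ pvSubst t bits)) := by
  induction t generalizing acc with
  | nil => simp [pvProdRep, pvSubst]
  | cons c t ih =>
    simp only [List.foldl_cons, List.countP_cons]
    by_cases hc : c = 'X'
    · rw [if_pos hc, ih]
      simp [hc, pvProdRep, pvSubst, List.flatMap_assoc, List.append_assoc]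
      congr 1
    · rw [if_neg hc, ih]
      simp [hc, pvSubst, List.flatMap_map, List.append_assoc]

theorem tmpl_eq (mask : String) (address : Int) :
    (mask.toList.zip (pvZfill36 (pvBin address))).map
      (fun p => if p.1 = 'X' then 'X' else if p.1 = '1' then '1' else p.2)
    = (mask.toList.zip (pvZfill36 (pvBin address))).map
      (fun p => if p.1 = '1' ∨ p.1 = 'X' then p.1 else p.2) := by
  apply List.map_congr_left
  intro p _
  by_cases h1 : p.1 = 'X' <;> by_cases h2 : p.1 = '1' <;> simp [h1, h2]

-- ===== VERDICT (by name: the statement is the Claim_ definition above) =====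
theorem address_masking_spec : Claim_equal_address_masking := by
  intro memory mask address value _ _
  unfold Spec_address_masking address_masking address_masking_alt
  rw [← tmpl_eq]
  set t := (mask.toList.zip (pvZfill36 (pvBin address))).map
      (fun p => if p.1 = 'X' then 'X' else if p.1 = '1' then '1' else p.2) with ht
  simp only [countX_eq t 0, Nat.zero_add, expand_eq t [[]]]
  simp only [List.flatMap_cons, List.flatMap_nil, List.append_nil, List.nil_append]
  congr 1
  rw [List.foldl_map]
  apply PySem.List.foldl_congr_mem
  intro d bits _
  rw [subst_eq]
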